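-- pv_equiv track=rewrite | github.com/iamabhi6345/DSA | dp/40_longest_string_chain.py | check
-- ===== SOURCE A (Python) =====
-- def check(s1 , s2):
--     n1 = len(s1)
--     n2 = len(s2)
--
--     if (n1-n2!=1):
--         return False
--     i=0
--     j=0
--     while(i<n1):
--         if j<n2 and (s1[i]==s2[j]):
--             i+=1
--             j+=1
--         else:
--             i+=1
--
--     if (i==n1 and j==n2):
--         return True
--     return False
-- ===== SOURCE B (Python) =====
-- def check(s1, s2):
--     for i in range(len(s1)):
--         if s1[:i] + s1[i+1:] == s2:
--             return True
--     return False
-- ===== Notes on version B (the rewrite author's own statement) =====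
-- stated objective: simpler
-- what changed: Replaced the length check plus two-pointer subsequence scan by a single loop that deletes each character of s1 and compares the result to s2 directly.
import Mathlib
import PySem

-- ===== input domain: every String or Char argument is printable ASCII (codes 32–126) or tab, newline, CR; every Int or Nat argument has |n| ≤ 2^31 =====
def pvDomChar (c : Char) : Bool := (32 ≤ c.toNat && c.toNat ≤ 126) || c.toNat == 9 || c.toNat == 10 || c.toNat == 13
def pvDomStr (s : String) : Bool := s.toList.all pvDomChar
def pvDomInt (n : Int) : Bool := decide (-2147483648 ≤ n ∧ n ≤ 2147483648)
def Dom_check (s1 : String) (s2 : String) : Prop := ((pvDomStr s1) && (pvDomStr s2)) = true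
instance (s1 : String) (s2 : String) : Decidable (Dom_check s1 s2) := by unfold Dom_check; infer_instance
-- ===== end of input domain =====

-- B replaces A's length check + two-pointer subsequence scan by a single loop that
-- deletes each character of s1 in turn and compares with s2 (objective: simpler).


-- ===== PORT A =====
-- the while loop: i walks over all of s1's chars; j advances (here: l2's head is consumed)
-- exactly when s1[i] == s2[j]. The returned list is s2's unmatched tail (final value n2 - j).
def checkLoop (l1 : List Char) (l2 : List Char) : List Char :=
  match l1, l2 with
  | [], l2 => l2
  | _ :: cs, [] => checkLoop cs []
  | c :: cs, d :: ds => if c = d then checkLoop cs ds else checkLoop cs (d :: ds)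

def check (s1 : String) (s2 : String) : Bool :=
  let n1 : Int := (s1.toList.length : Int)
  let n2 : Int := (s2.toList.length : Int)
  if n1 - n2 ≠ 1 then false
  else
    -- after the while loop i == n1 always holds; 'j == n2' is: all of s2 was consumed
    if (checkLoop s1.toList s2.toList).isEmpty then true else false

-- ===== PORT B =====
-- s1[:i] + s1[i+1:] ported as take i ++ drop (i+1) (exact for 0 ≤ i < len s1)
def check_alt (s1 : String) (s2 : String) : Bool :=
  (List.range s1.toList.length).any
    (fun i => (s1.toList.take i ++ s1.toList.drop (i + 1)) = s2.toList)

-- ===== PRECONDITION & SPEC =====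
def Spec_check (s1 : String) (s2 : String) (out : Bool) : Prop := out = check_alt s1 s2
instance (s1 : String) (s2 : String) (out : Bool) : Decidable (Spec_check s1 s2 out) := by unfold Spec_check; infer_instance

-- ===== CLAIM (what is proved, stated in full; the proofs are below) =====
def Claim_equal_check : Prop := ∀ (s1 : String) (s2 : String), Dom_check s1 s2 → Spec_check s1 s2 (check s1 s2)

-- ===== LEMMAS AND PROOFS =====

theorem checkLoop_nil (l1 : List Char) : checkLoop l1 [] = [] := by
  induction l1 with
  | nil => rfl
  | cons c cs ih => simpa [checkLoop] using ih

-- the greedy two-pointer scan consumes all of s2 iff s2 is a sublist of s1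
theorem checkLoop_eq_nil_iff (l1 l2 : List Char) :
    checkLoop l1 l2 = [] ↔ l2.Sublist l1 := by
  induction l1 generalizing l2 with
  | nil =>
    cases l2 with
    | nil => simp [checkLoop]
    | cons d ds => simp [checkLoop]
  | cons c cs ih =>
    cases l2 with
    | nil => simp [checkLoop, checkLoop_nil]
    | cons d ds =>
      by_cases h : c = d
      · subst h
        simp [checkLoop, ih]
      · simp only [checkLoop, if_neg h, ih]
        constructor
        · intro hs; exact hs.cons c
        · intro hs
          cases hs with
          | cons _ hs => exact hs
          | cons₂ _ hs => exact absurd rfl h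

-- a sublist exactly one shorter is an eraseIdx
theorem sublist_len_succ (l2 l1 : List Char) (h : l2.Sublist l1)
    (hl : l1.length = l2.length + 1) :
    ∃ i < l1.length, l1.eraseIdx i = l2 := by
  induction h with
  | slnil => simp at hl
  | @cons l₂ l₁ c h ih =>
    have : l₁.length = l₂.length := by simpa using hl
    have : l₂ = l₁ := h.eq_of_length this.symm
    exact ⟨0, by simp, by simpa [List.eraseIdx] using this.symm⟩
  | @cons₂ l₂ l₁ c h ih =>
    have hl' : l₁.length = l₂.length + 1 := by simpa using hl
    obtain ⟨i, hi, he⟩ := ih hl'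
    exact ⟨i + 1, by simpa using hi, by simp [List.eraseIdx, he]⟩

theorem eraseIdx_case (l1 l2 : List Char) (hl : l1.length = l2.length + 1) :
    (checkLoop l1 l2 = []) ↔ ∃ i < l1.length, l1.eraseIdx i = l2 := by
  rw [checkLoop_eq_nil_iff]
  constructor
  · intro h; exact sublist_len_succ l2 l1 h hl
  · rintro ⟨i, hi, rfl⟩; exact List.eraseIdx_sublist l1 i

-- ===== VERDICT (by name: the statement is the Claim_ definition above) =====
theorem check_spec : Claim_equal_check := by
  intro s1 s2 _
  unfold Spec_check check check_alt
  set l1 := s1.toList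
  set l2 := s2.toList
  by_cases hlen : (l1.length : Int) - (l2.length : Int) = 1
  · have hl : l1.length = l2.length + 1 := by omega
    simp only [hlen, sub_eq_iff_eq_add] at *
    have := eraseIdx_case l1 l2 hl
    by_cases h : checkLoop l1 l2 = []
    · obtain ⟨i, hi, he⟩ := this.mp h
      have : (List.range l1.length).any
          (fun i => (l1.take i ++ l1.drop (i + 1)) = l2) = true := by
        refine List.any_eq_true.mpr ⟨i, by simpa using hi, ?_⟩
        simp [← List.eraseIdx_eq_take_drop_succ, he]
      simp [h, this]
    · have : (List.range l1.length).any
          (fun i => (l1.take i ++ l1.drop (i + 1)) = l2) = false := by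
        rw [List.any_eq_false]
        intro i hi hcontra
        simp only [decide_eq_true_eq, ← List.eraseIdx_eq_take_drop_succ] at hcontra
        exact h (this.mpr ⟨i, by simpa using hi, hcontra⟩)
      simp [h, this]
  · have : (List.range l1.length).any
        (fun i => (l1.take i ++ l1.drop (i + 1)) = l2) = false := by
      rw [List.any_eq_false]
      intro i hi hcontra
      simp only [List.mem_range] at hi
      simp only [decide_eq_true_eq] at hcontra
      have : (l1.take i ++ l1.drop (i + 1)).length = l1.length - 1 := by
        simp [List.length_take, List.length_drop]; omega
      rw [hcontra] at this
      omega
    simp [hlen, this]
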